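-- pv_equiv track=rewrite | github.com/NinaHwang/Algorithm | array/maxSumInTheConfiguration.py | solution
-- ===== SOURCE A (Python) =====
-- def solution(a, n):
--     answer = 0
--     for i in range(n):
--         answer += a[i] * i
--     prev_result, total_sum = answer, sum(a)
--
--     for i in range(n-1):
--         result = prev_result - total_sum + a[i] * n
--         if result > answer:
--             answer = result
--
--         prev_result = result
--
--     return answer
-- ===== SOURCE B (Python) =====
-- def solution(a, n):
--     base = sum(i * a[i] for i in range(n))
--     return max([base] + [n * sum(a[:k]) - k * sum(a) + base for k in range(1, n)])
-- ===== Notes on version B (the rewrite author's own statement) =====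
-- stated objective: alternative
-- what changed: B is a staged brute force: it recomputes each rotation's value from scratch per k (n*sum(a[:k]) - k*sum(a) + base) into an explicit candidate list and takes max of it, instead of A's single online pass carrying prev_result and updating the running answer; B trades O(n) for O(n^2).
import Mathlib
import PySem

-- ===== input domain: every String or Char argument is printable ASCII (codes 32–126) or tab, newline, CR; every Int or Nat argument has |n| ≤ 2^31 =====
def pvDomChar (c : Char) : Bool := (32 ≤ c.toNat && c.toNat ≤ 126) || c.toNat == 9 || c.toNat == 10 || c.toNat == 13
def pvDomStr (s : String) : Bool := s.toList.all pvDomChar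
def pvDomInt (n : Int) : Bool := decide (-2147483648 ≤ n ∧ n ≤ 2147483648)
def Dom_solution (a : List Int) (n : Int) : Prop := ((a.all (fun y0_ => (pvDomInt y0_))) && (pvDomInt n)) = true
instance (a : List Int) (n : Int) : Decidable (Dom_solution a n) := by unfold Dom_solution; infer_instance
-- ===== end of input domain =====

-- B is a staged brute force: it builds an explicit candidate list, recomputing each rotation's
-- value from scratch (n*sum(a[:k]) - k*sum(a) + base), and takes its max — instead of A's online
-- prev_result recurrence; objective: alternative (O(n^2) vs A's O(n)).


-- ===== PORT A =====
def solution (a : List Int) (n : Int) : Int :=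
  let answer := (PySem.List.pyRange 0 n 1).foldl
    (fun acc i => acc + PySem.List.pyGetD a i 0 * i) 0
  let total_sum := a.sum
  let st := (PySem.List.pyRange 0 (n - 1) 1).foldl
    (fun (s : Int × Int) i =>
      let result := s.2 - total_sum + PySem.List.pyGetD a i 0 * n
      (if result > s.1 then result else s.1, result))
    (answer, answer)
  st.1

-- ===== PORT B =====
def solution_alt (a : List Int) (n : Int) : Int :=
  let base := (PySem.List.pyRange 0 n 1).foldl
    (fun acc i => acc + i * PySem.List.pyGetD a i 0) 0
  let cands := base :: (PySem.List.pyRange 1 n 1).map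
    (fun k => n * (PySem.List.slice a none (some k)).sum - k * a.sum + base)
  -- Python's max(lst) on a nonempty list: first maximal element (hand port, exact)
  match cands with
  | [] => 0
  | h :: t => t.foldl (fun m x => if x > m then x else m) h

-- ===== PRECONDITION & SPEC =====
-- Pre_ excludes exactly the inputs where Python A raises IndexError: n larger than len(a).
def Pre_solution (a : List Int) (n : Int) : Prop := n ≤ (a.length : Int)
instance (a : List Int) (n : Int) : Decidable (Pre_solution a n) := by unfold Pre_solution; infer_instance
def pvWitness_solution : List Int × Int := ([1, -2, 3], 3)

def Spec_solution (a : List Int) (n : Int) (out : Int) : Prop := out = solution_alt a n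
instance (a : List Int) (n : Int) (out : Int) : Decidable (Spec_solution a n out) := by unfold Spec_solution; infer_instance

-- ===== CLAIM =====
def Claim_equal_solution : Prop := ∀ (a : List Int) (n : Int), Dom_solution a n → Pre_solution a n → Spec_solution a n (solution a n)

-- ===== LEMMAS AND PROOFS =====

-- The two base sums agree (a[i]*i vs i*a[i]).
lemma base_eq (a : List Int) (n : Int) :
    (PySem.List.pyRange 0 n 1).foldl (fun acc i => acc + PySem.List.pyGetD a i 0 * i) 0
      = (PySem.List.pyRange 0 n 1).foldl (fun acc i => acc + i * PySem.List.pyGetD a i 0) 0 := by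
  apply List.foldl_ext
  intro acc i _
  ring

-- B's candidate formula, as a function of k.
def cand (a : List Int) (n base : Int) (k : Int) : Int :=
  n * (PySem.List.slice a none (some k)).sum - k * a.sum + base

lemma cand_zero (a : List Int) (n base : Int) : cand a n base 0 = base := by
  unfold cand
  rw [show PySem.List.slice a none (some 0) = a.take (0:Int).toNat from
        PySem.List.slice_to a (by omega)]
  simp

-- One slice step: sum(a[:k+1]) = sum(a[:k]) + a[k] for 0 ≤ k < len(a).
lemma cand_step (a : List Int) (n base : Int) (k : Int) (h0 : 0 ≤ k)
    (hk : k < (a.length : Int)) :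
    cand a n base (k + 1) = cand a n base k - a.sum + PySem.List.pyGetD a k 0 * n := by
  obtain ⟨m, rfl⟩ : ∃ m : Nat, k = (m : Int) := ⟨k.toNat, (Int.toNat_of_nonneg h0).symm⟩
  have hm : m < a.length := by exact_mod_cast hk
  unfold cand
  rw [show ((m : Int) + 1) = ((m + 1 : Nat) : Int) by push_cast; ring,
      PySem.List.slice_to_natCast, PySem.List.slice_to_natCast,
      List.take_add_one, List.sum_append,
      PySem.List.pyGetD_natCast]
  simp [List.getElem?_eq_getElem hm, List.sum_cons]
  ring

-- Loop correspondence: A's stateful pass over range(i, n-1) starting from (ans, cand i)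
-- equals Python-max folded over B's candidates for k in range(i+1, n), starting from ans.
lemma loop_eq (a : List Int) (n base : Int) (hlen : n ≤ (a.length : Int)) :
    ∀ (m : Nat) (i ans : Int), (n - 1 - i).toNat = m → 0 ≤ i →
      ((PySem.List.pyRange i (n - 1) 1).foldl
        (fun (s : Int × Int) j =>
          let result := s.2 - a.sum + PySem.List.pyGetD a j 0 * n
          (if result > s.1 then result else s.1, result)) (ans, cand a n base i)).1
      =
      ((PySem.List.pyRange (i + 1) n 1).map (cand a n base)).foldl
        (fun m x => if x > m then x else m) ans := by
  intro m
  induction m with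
  | zero =>
    intro i ans hm hi
    rw [PySem.List.pyRange_one_eq_nil (by omega), PySem.List.pyRange_one_eq_nil (by omega)]
    rfl
  | succ m ih =>
    intro i ans hm hi
    rw [show PySem.List.pyRange i (n - 1) 1 = i :: PySem.List.pyRange (i + 1) (n - 1) 1 from
          PySem.List.pyRange_one_cons (by omega),
        show PySem.List.pyRange (i + 1) n 1 = (i + 1) :: PySem.List.pyRange (i + 1 + 1) n 1 from
          PySem.List.pyRange_one_cons (by omega)]
    simp only [List.foldl_cons, List.map_cons]
    rw [show cand a n base i - a.sum + PySem.List.pyGetD a i 0 * n = cand a n base (i + 1) from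
          (cand_step a n base i hi (by omega)).symm]
    exact ih (i + 1) _ (by omega) (by omega)

theorem solution_eq_alt (a : List Int) (n : Int) (hlen : n ≤ (a.length : Int)) :
    solution a n = solution_alt a n := by
  unfold solution solution_alt
  rw [base_eq]
  have h := loop_eq a n
    ((PySem.List.pyRange 0 n 1).foldl (fun acc i => acc + i * PySem.List.pyGetD a i 0) 0)
    hlen (n - 1 - 0).toNat 0
    ((PySem.List.pyRange 0 n 1).foldl (fun acc i => acc + i * PySem.List.pyGetD a i 0) 0)
    rfl (by omega)
  rw [cand_zero] at h
  exact h

-- ===== VERDICT =====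
theorem solution_spec : Claim_equal_solution := by
  intro a n _ hpre
  exact solution_eq_alt a n hpre
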